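-- pv_equiv track=rewrite | github.com/LinMoQC/LyraNote | apps/api/app/agents/research/deep_research.py | compute_evidence_strength
-- ===== SOURCE A (Python) =====
-- def compute_evidence_strength(learnings: list[dict]) -> str:
--     """Aggregate evidence strength across all learnings."""
--     total = sum(len(l.get("citations", [])) for l in learnings)
--     has_web = any(c.get("type") == "web" for l in learnings for c in l.get("citations", []))
--     has_internal = any(c.get("type") == "internal" for l in learnings for c in l.get("citations", []))
--     if total >= 6 and has_web and has_internal:
--         return "high"
--     if total >= 3:
--         return "medium"
--     return "low"
-- ===== SOURCE B (Python) =====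
-- def compute_evidence_strength(learnings: list[dict]) -> str:
--     """Aggregate evidence strength via a histogram of citation types."""
--     counts = {}
--     for l in learnings:
--         for c in l.get("citations", []):
--             t = c.get("type")
--             counts[t] = counts.get(t, 0) + 1
--     total = sum(counts.values())
--     if total >= 6 and "web" in counts and "internal" in counts:
--         return "high"
--     if total >= 3:
--         return "medium"
--     return "low"
-- ===== Notes on version B (the rewrite author's own statement) =====
-- stated objective: alternative
-- what changed: Instead of A's three separate scans (a sum plus two any-comprehensions over the nested citations), B builds a histogram (dict) of citation types in one traversal and then derives the total from the histogram's values and the web/internal flags from key membership.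
import Mathlib
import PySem

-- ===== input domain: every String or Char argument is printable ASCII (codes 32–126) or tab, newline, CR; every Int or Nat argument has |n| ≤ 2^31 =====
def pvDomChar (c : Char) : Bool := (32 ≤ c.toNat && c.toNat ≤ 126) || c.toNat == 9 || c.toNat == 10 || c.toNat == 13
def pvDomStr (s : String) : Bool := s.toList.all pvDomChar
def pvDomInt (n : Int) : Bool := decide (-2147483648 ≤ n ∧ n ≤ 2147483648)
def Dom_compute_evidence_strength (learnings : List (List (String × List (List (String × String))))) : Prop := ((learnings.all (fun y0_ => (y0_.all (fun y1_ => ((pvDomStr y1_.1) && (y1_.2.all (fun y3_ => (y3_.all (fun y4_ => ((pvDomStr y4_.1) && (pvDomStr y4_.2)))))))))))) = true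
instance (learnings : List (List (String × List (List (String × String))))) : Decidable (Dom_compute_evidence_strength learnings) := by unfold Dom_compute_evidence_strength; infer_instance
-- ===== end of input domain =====

-- B replaces A's three traversals (a sum and two any-scans) by building a histogram of
-- citation types once, then reading total and both flags off the histogram; return value only.

-- ===== PORT A =====
def compute_evidence_strength (learnings : List (List (String × List (List (String × String))))) : String :=
  let total : Nat := (learnings.map (fun l => ((PySem.Dict.mk l).getD "citations" []).length)).sum
  let has_web : Bool := learnings.any (fun l => ((PySem.Dict.mk l).getD "citations" []).any
    (fun c => (PySem.Dict.mk c).get? "type" == some "web"))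
  let has_internal : Bool := learnings.any (fun l => ((PySem.Dict.mk l).getD "citations" []).any
    (fun c => (PySem.Dict.mk c).get? "type" == some "internal"))
  if 6 ≤ total && has_web && has_internal then "high"
  else if 3 ≤ total then "medium"
  else "low"

-- ===== PORT B =====
def compute_evidence_strength_alt (learnings : List (List (String × List (List (String × String))))) : String :=
  let counts : PySem.Dict (Option String) Int :=
    learnings.foldl (fun d l =>
      ((PySem.Dict.mk l).getD "citations" []).foldl
        (fun d c =>
          let t := (PySem.Dict.mk c).get? "type"
          d.insert t (d.getD t 0 + 1)) d)
      PySem.Dict.empty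
  let total : Int := counts.values.sum
  if 6 ≤ total && counts.contains (some "web") && counts.contains (some "internal") then "high"
  else if 3 ≤ total then "medium"
  else "low"

-- ===== PRECONDITION & SPEC =====
def Spec_compute_evidence_strength (learnings : List (List (String × List (List (String × String))))) (out : String) : Prop := out = compute_evidence_strength_alt learnings
instance (learnings : List (List (String × List (List (String × String))))) (out : String) : Decidable (Spec_compute_evidence_strength learnings out) := by unfold Spec_compute_evidence_strength; infer_instance

-- ===== CLAIM (what is proved, stated in full; the proofs are below) =====
def Claim_equal_compute_evidence_strength : Prop := ∀ (learnings : List (List (String × List (List (String × String))))), Dom_compute_evidence_strength learnings → Spec_compute_evidence_strength learnings (compute_evidence_strength learnings)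

-- ===== LEMMAS AND PROOFS =====

-- the flattened list of citation types whose histogram B builds
def pvTypes (learnings : List (List (String × List (List (String × String))))) : List (Option String) :=
  learnings.flatMap (fun l => ((PySem.Dict.mk l).getD "citations" []).map
    (fun c => (PySem.Dict.mk c).get? "type"))

lemma pvCounts_eq (learnings : List (List (String × List (List (String × String))))) :
    learnings.foldl (fun d l =>
      ((PySem.Dict.mk l).getD "citations" []).foldl
        (fun d c =>
          let t := (PySem.Dict.mk c).get? "type"
          d.insert t (d.getD t 0 + 1)) d)
      PySem.Dict.empty = PySem.Dict.counter (pvTypes learnings) := by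
  rw [← PySem.Dict.foldl_insert_getD_add_one_eq_counter, pvTypes, List.foldl_flatMap]
  simp [List.foldl_map]

lemma pvSum_count {κ : Type} [BEq κ] [LawfulBEq κ] (xs ks : List κ) (hnd : ks.Nodup)
    (hsub : ∀ x ∈ xs, x ∈ ks) :
    (ks.map (fun k => (xs.count k : Int))).sum = xs.length := by
  induction xs with
  | nil => simp
  | cons x xs ih =>
    have hx : ks.count x = 1 := List.count_eq_one_of_mem hnd (hsub x (by simp))
    have h1 : (ks.map (fun k => ((x :: xs).count k : Int))).sum
        = (ks.map (fun k => (xs.count k : Int))).sum + (ks.map (fun k => if x == k then (1:Int) else 0)).sum := by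
      rw [← List.sum_map_add]
      congr 1; apply List.map_congr_left; intro k _
      rw [List.count_cons]
      by_cases h : (k == x) = true
      · have h' : (x == k) = true := by simp_all [BEq.comm]
        simp [h']
      · have h' : (x == k) = false := by simp_all [BEq.comm]
        simp [h']
    have h2 : (ks.map (fun k => if x == k then (1:Int) else 0)).sum = (ks.count x : Int) := by
      rw [List.count_eq_countP, PySem.List.sum_map_ite_one_zero]
      congr 1; apply List.countP_congr; intro k _; simp [BEq.comm]
    rw [h1, ih (fun y hy => hsub y (by simp [hy])), h2, hx]
    simp

lemma pvSum_counter {κ : Type} [BEq κ] [LawfulBEq κ] (xs : List κ) :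
    (PySem.Dict.counter xs).values.sum = (xs.length : Int) := by
  rw [PySem.Dict.values_eq_map_keys _ (PySem.Dict.nodup_keys_counter xs) 0, PySem.Dict.keys_counter]
  have h : (PySem.Set.ofList xs).map (fun k => (PySem.Dict.counter xs).getD k 0)
      = (PySem.Set.ofList xs).map (fun k => (xs.count k : Int)) := by
    apply List.map_congr_left; intro k _; rw [PySem.Dict.getD_counter]
  rw [h]
  exact pvSum_count xs _ (PySem.Set.nodup_ofList xs) (fun x hx => (PySem.Set.mem_ofList xs x).mpr hx)

lemma pvLen_types (learnings : List (List (String × List (List (String × String))))) :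
    (pvTypes learnings).length = (learnings.map (fun l => ((PySem.Dict.mk l).getD "citations" []).length)).sum := by
  simp [pvTypes]

lemma pvContains_types (learnings : List (List (String × List (List (String × String))))) (s : String) :
    (pvTypes learnings).contains (some s) = learnings.any (fun l => ((PySem.Dict.mk l).getD "citations" []).any
      (fun c => (PySem.Dict.mk c).get? "type" == some s)) := by
  apply Bool.eq_iff_iff.mpr
  simp [pvTypes, List.mem_flatMap]

-- ===== VERDICT (by name: the statement is the Claim_ definition above) =====
theorem compute_evidence_strength_spec : Claim_equal_compute_evidence_strength := by
  intro learnings _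
  unfold Spec_compute_evidence_strength
  simp only [compute_evidence_strength, compute_evidence_strength_alt, pvCounts_eq, pvSum_counter,
    PySem.Dict.contains_counter, pvContains_types, pvLen_types]
  congr 2
  · congr 2
    rw [decide_eq_decide]
    omega
  · rw [eq_iff_iff]
    omega
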